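-- pv_equiv track=rewrite | github.com/OmarMRIS/Projects-2024 | TESTS/Term 1 (G11)/Upgraded Caesar Cipher.py | double_caesar_encrypt
-- ===== SOURCE A (Python) =====
-- def double_caesar_encrypt(plaintext, key1, key2):  # encrypt function
--     ciphertext = ""  # empty string where the ciphertext will be stored after encryption
--     position = 0  # position of each letter starting from the first letter
--     for letter in plaintext:
--         char = letter
--         if char.isalpha():  # Alphabetic check
--             if position % 2 == 0:  # odd and even part
--                 shift = key1
--             else:
--                 shift = key2
--             if char.isupper():  # if the character is uppercase, do the following
--                 encrypted_char = chr(((ord(char) - ord('A') + shift) % 26) + ord('A'))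
--             else:
--                 encrypted_char = chr(((ord(char) - ord('a') + shift) % 26) + ord('a'))
--         else:
--             encrypted_char = char  # characters that are not alphanumeric stay the same
--         ciphertext += encrypted_char  # storing part
--         position += 1  # Incremention
--     return ciphertext
-- ===== SOURCE B (Python) =====
-- def double_caesar_encrypt(plaintext, key1, key2):
--     # two-pass: encrypt the even-index and odd-index slices separately, then re-interleave
--     def enc(c, s):
--         if 'A' <= c <= 'Z':
--             return chr((ord(c) - 65 + s) % 26 + 65)
--         if 'a' <= c <= 'z':
--             return chr((ord(c) - 97 + s) % 26 + 97)
--         return c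
--     s1 = key1 % 26
--     s2 = key2 % 26
--     even = ''.join(enc(c, s1) for c in plaintext[0::2])
--     odd = ''.join(enc(c, s2) for c in plaintext[1::2])
--     out = []
--     for a, b in zip(even, odd):
--         out.append(a)
--         out.append(b)
--     if len(even) > len(odd):
--         out.append(even[-1])
--     return ''.join(out)
-- ===== Notes on version B (the rewrite author's own statement) =====
-- stated objective: alternative
-- what changed: Replaced the single pass with a per-position parity test by two passes: the even-index and odd-index step-2 slices are each encrypted with their own shift (reduced mod 26 once) and the two encrypted slices are re-interleaved.
import Mathlib
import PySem

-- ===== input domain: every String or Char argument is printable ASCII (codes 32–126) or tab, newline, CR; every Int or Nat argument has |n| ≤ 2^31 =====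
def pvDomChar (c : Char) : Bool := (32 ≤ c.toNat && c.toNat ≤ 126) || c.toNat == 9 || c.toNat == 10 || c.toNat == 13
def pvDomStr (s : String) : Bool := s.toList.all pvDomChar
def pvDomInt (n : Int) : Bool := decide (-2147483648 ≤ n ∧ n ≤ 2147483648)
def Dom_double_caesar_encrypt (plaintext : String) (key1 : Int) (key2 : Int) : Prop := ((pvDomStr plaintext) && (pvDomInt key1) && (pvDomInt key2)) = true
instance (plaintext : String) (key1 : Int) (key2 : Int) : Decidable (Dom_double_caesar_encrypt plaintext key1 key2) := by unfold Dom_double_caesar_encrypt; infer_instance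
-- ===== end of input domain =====

-- B re-implements the cipher as two passes: encrypt the even-index and odd-index step-2 slices
-- separately (shift reduced mod 26 once per slice), then re-interleave; objective: alternative
-- structure, same cost.

-- ===== PORT A =====
-- single pass over the string with a running position counter, appending one char per step
def double_caesar_encrypt (plaintext : String) (key1 : Int) (key2 : Int) : String :=
  let r := plaintext.toList.foldl
    (fun (st : List Char × Int) letter =>
      let ch := letter
      let encrypted_char :=
        if PySem.Chars.isalpha ch then
          let shift := if PySem.Int.mod st.2 2 = 0 then key1 else key2
          if PySem.Chars.isupper ch then
            Char.ofNat ((PySem.Int.mod ((ch.toNat : Int) - 65 + shift) 26).toNat + 65)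
          else
            Char.ofNat ((PySem.Int.mod ((ch.toNat : Int) - 97 + shift) 26).toNat + 97)
        else ch
      (st.1 ++ [encrypted_char], st.2 + 1))
    ([], 0)
  String.mk r.1

-- ===== PORT B =====
-- B's per-char helper: range checks instead of isalpha/isupper, shift already reduced mod 26
def pvEncChar (c : Char) (s : Int) : Char :=
  if 'A' ≤ c ∧ c ≤ 'Z' then Char.ofNat ((PySem.Int.mod ((c.toNat : Int) - 65 + s) 26).toNat + 65)
  else if 'a' ≤ c ∧ c ≤ 'z' then Char.ofNat ((PySem.Int.mod ((c.toNat : Int) - 97 + s) 26).toNat + 97)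
  else c

def double_caesar_encrypt_alt (plaintext : String) (key1 : Int) (key2 : Int) : String :=
  let s1 := PySem.Int.mod key1 26
  let s2 := PySem.Int.mod key2 26
  -- plaintext[0::2] and plaintext[1::2] (a step-2 slice never fails, hence getD [])
  let even := ((PySem.List.slice? plaintext.toList (some 0) none 2).getD []).map (pvEncChar · s1)
  let odd  := ((PySem.List.slice? plaintext.toList (some 1) none 2).getD []).map (pvEncChar · s2)
  let out := (even.zip odd).foldl (fun acc p => acc ++ [p.1, p.2]) []
  let out := if odd.length < even.length then out ++ (PySem.List.pyGet? even (-1)).toList else out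
  String.mk out

-- ===== PRECONDITION & SPEC =====
def Spec_double_caesar_encrypt (plaintext : String) (key1 : Int) (key2 : Int) (out : String) : Prop := out = double_caesar_encrypt_alt plaintext key1 key2
instance (plaintext : String) (key1 : Int) (key2 : Int) (out : String) : Decidable (Spec_double_caesar_encrypt plaintext key1 key2 out) := by unfold Spec_double_caesar_encrypt; infer_instance

-- ===== CLAIM (what is proved, stated in full; the proofs are below) =====
def Claim_equal_double_caesar_encrypt : Prop := ∀ (plaintext : String) (key1 : Int) (key2 : Int), Dom_double_caesar_encrypt plaintext key1 key2 → Spec_double_caesar_encrypt plaintext key1 key2 (double_caesar_encrypt plaintext key1 key2)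

-- ===== LEMMAS AND PROOFS =====

-- A's per-char encryption, extracted
def pvEncA (c : Char) (k : Int) : Char :=
  if PySem.Chars.isalpha c then
    if PySem.Chars.isupper c then
      Char.ofNat ((PySem.Int.mod ((c.toNat : Int) - 65 + k) 26).toNat + 65)
    else
      Char.ofNat ((PySem.Int.mod ((c.toNat : Int) - 97 + k) 26).toNat + 97)
  else c

-- A's loop output, with the two keys swapping roles at each step (position parity)
def pvWeave (k1 k2 : Int) : List Char → List Char
  | [] => []
  | c :: cs => pvEncA c k1 :: pvWeave k2 k1 cs

-- elements at even indices
def pvEvens {α : Type} : List α → List α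
  | [] => []
  | [x] => [x]
  | x :: _ :: xs => x :: pvEvens xs

-- B's interleaving step, extracted
def pvIlv (E O : List Char) : List Char :=
  let out := (E.zip O).foldl (fun acc p => acc ++ [p.1, p.2]) []
  if O.length < E.length then out ++ (PySem.List.pyGet? E (-1)).toList else out

theorem pvEncA_eq (c : Char) (k : Int) : pvEncA c k = pvEncChar c (PySem.Int.mod k 26) := by
  have hm : ∀ a : Int, PySem.Int.mod a 26 = a % 26 := fun a =>
    PySem.Int.mod_eq_emod_of_pos (by norm_num)
  unfold pvEncA pvEncChar PySem.Chars.isalpha PySem.Chars.isupper PySem.Chars.islower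
  simp only [hm]
  split_ifs with h1 h2 h3 h4 h5 <;>
    simp_all [Char.le_def, UInt32.le_iff_toNat_le, decide_eq_true_eq] <;>
    first
      | (congr 1; omega)
      | omega
      | rfl

theorem pvFoldA (key1 key2 : Int) (cs : List Char) : ∀ (acc : List Char) (p : Int),
    (cs.foldl
      (fun (st : List Char × Int) letter =>
        let ch := letter
        let encrypted_char :=
          if PySem.Chars.isalpha ch then
            let shift := if PySem.Int.mod st.2 2 = 0 then key1 else key2
            if PySem.Chars.isupper ch then
              Char.ofNat ((PySem.Int.mod ((ch.toNat : Int) - 65 + shift) 26).toNat + 65)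
            else
              Char.ofNat ((PySem.Int.mod ((ch.toNat : Int) - 97 + shift) 26).toNat + 97)
          else ch
        (st.1 ++ [encrypted_char], st.2 + 1))
      (acc, p)).1
    = acc ++ pvWeave (if PySem.Int.mod p 2 = 0 then key1 else key2)
                     (if PySem.Int.mod p 2 = 0 then key2 else key1) cs := by
  induction cs with
  | nil => intro acc p; simp [pvWeave]
  | cons c cs ih =>
    intro acc p
    have h2 : (0:Int) < 2 := by norm_num
    have hp : PySem.Int.mod p 2 = 0 ∨ PySem.Int.mod p 2 = 1 := by
      simp only [PySem.Int.mod_eq_emod_of_pos h2]; omega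
    have hp1 : PySem.Int.mod p 2 = 0 → PySem.Int.mod (p+1) 2 = 1 := by
      simp only [PySem.Int.mod_eq_emod_of_pos h2]; omega
    have hp2 : PySem.Int.mod p 2 = 1 → PySem.Int.mod (p+1) 2 = 0 := by
      simp only [PySem.Int.mod_eq_emod_of_pos h2]; omega
    rcases hp with hp | hp
    · simp only [List.foldl_cons, ih, pvWeave, hp, hp1 hp]
      simp [pvEncA]
    · simp only [List.foldl_cons, ih, pvWeave, hp, hp2 hp]
      simp [pvEncA]

theorem pvGet_neg_one_cons (x : Char) (E : List Char) (h : E ≠ []) :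
    PySem.List.pyGet? (x :: E) (-1) = PySem.List.pyGet? E (-1) := by
  cases E with
  | nil => exact absurd rfl h
  | cons a l =>
    simp [PySem.List.pyGet?, PySem.List.pyIdx?]
    rfl

theorem pvIlv_cons (x y : Char) (E O : List Char) :
    pvIlv (x :: E) (y :: O) = x :: y :: pvIlv E O := by
  unfold pvIlv
  simp only [List.zip_cons_cons, List.foldl_cons, List.nil_append,
    PySem.List.foldl_append_eq_flatMap, List.length_cons]
  by_cases h : O.length < E.length
  · have hE : E ≠ [] := by intro hn; subst hn; simp at h
    rw [pvGet_neg_one_cons x E hE]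
    simp [h, Nat.add_lt_add_right h 1]
  · have h' : ¬ (O.length + 1 < E.length + 1) := by omega
    simp [h, h']

theorem pvEvens_cons {α : Type} (y : α) (xs : List α) :
    pvEvens (y :: xs) = y :: pvEvens xs.tail := by
  cases xs <;> simp [pvEvens]

theorem pvWeave_eq (k1 k2 : Int) (cs : List Char) :
    pvWeave k1 k2 cs = pvIlv ((pvEvens cs).map (pvEncA · k1)) ((pvEvens cs.tail).map (pvEncA · k2)) := by
  induction cs using pvEvens.induct with
  | case1 => simp [pvWeave, pvEvens, pvIlv]
  | case2 x => simp [pvWeave, pvEvens, pvIlv, PySem.List.pyGet?, PySem.List.pyIdx?]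
  | case3 x y xs ih =>
    simp only [pvWeave, List.tail_cons, pvEvens, pvEvens_cons y xs, List.map_cons, pvIlv_cons, ih]

-- pvEvens equals the filterMap-over-range form that slice? computes
theorem pvEvens_eq_filterMap {α : Type} (xs : List α) :
    pvEvens xs = (List.range ((xs.length + 1) / 2)).filterMap (fun k => xs[2 * k]?) := by
  induction xs using pvEvens.induct with
  | case1 => simp [pvEvens]
  | case2 x => simp [pvEvens, List.range_succ]
  | case3 x y xs ih =>
    have hlen : ((x :: y :: xs).length + 1) / 2 = (xs.length + 1) / 2 + 1 := by
      simp; omega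
    rw [pvEvens, hlen, List.range_succ_eq_map]
    simp only [List.filterMap_cons, List.filterMap_map]
    have h2 : ∀ k : Nat, (x :: y :: xs)[2 * (k + 1)]? = xs[2 * k]? := by
      intro k
      rw [show 2 * (k + 1) = 2 * k + 1 + 1 by omega]
      simp
    simp only [Function.comp_def, h2]
    simp [ih]

theorem pvSlice0 {α : Type} (xs : List α) :
    PySem.List.slice? xs (some 0) none 2 = some (pvEvens xs) := by
  rw [pvEvens_eq_filterMap]
  simp only [PySem.List.slice?, PySem.List.sliceIndices]
  norm_num
  have hc : ∀ k : Nat, ((2 * (k:Int)).toNat) = 2 * k := fun k => by omega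
  simp only [hc]
  have hcnt : (if 0 < xs.length then (((xs.length:Int) + 2 - 1) / 2).toNat else 0) = (xs.length + 1) / 2 := by
    split_ifs with h <;> omega
  rw [hcnt]

theorem pvSlice1 {α : Type} (xs : List α) :
    PySem.List.slice? xs (some 1) none 2 = some (pvEvens xs.tail) := by
  cases xs with
  | nil => simp [PySem.List.slice?, PySem.List.sliceIndices, pvEvens]
  | cons x rest =>
    rw [List.tail_cons, pvEvens_eq_filterMap]
    simp only [PySem.List.slice?, PySem.List.sliceIndices]
    norm_num
    have hc : ∀ k : Nat, ((1 + 2 * (k:Int)).toNat) = 2 * k + 1 := fun k => by omega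
    simp only [hc, List.getElem?_cons_succ]
    have hcnt : (if 0 < rest.length then (((rest.length:Int) + 2 - 1) / 2).toNat else 0) = (rest.length + 1) / 2 := by
      split_ifs with h <;> omega
    rw [hcnt]

-- ===== VERDICT (by name: the statement is the Claim_ definition above) =====
theorem double_caesar_encrypt_spec : Claim_equal_double_caesar_encrypt := by
  intro plaintext key1 key2 _hdom
  unfold Spec_double_caesar_encrypt double_caesar_encrypt double_caesar_encrypt_alt
  rw [pvSlice0, pvSlice1]
  simp only [Option.getD_some]
  rw [pvFoldA]
  have h0 : PySem.Int.mod (0:Int) 2 = 0 := by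
    rw [PySem.Int.mod_eq_emod_of_pos (by norm_num : (0:Int) < 2)]; norm_num
  simp only [h0, List.nil_append]
  rw [pvWeave_eq]
  simp only [pvIlv, pvEncA_eq]
  simp
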